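-- pv_equiv track=rewrite | github.com/SubhamPaul21/mcp_servers | servers/pull_request_agent_server.py | _find_best_template
-- ===== SOURCE A (Python) =====
-- from typing import Dict, List
--
-- def _find_best_template(
--     change_type: str, templates: List[Dict[str, str]]
-- ) -> Dict[str, str]:
--     """Try to pick the best template whose filename or content matches the change_type."""
--     ct = change_type.lower()
--     # Common canonical name mappings
--     canonical_map = {
--         "bug": ["bug", "fix", "bugfix"],
--         "feature": ["feature", "enhancement", "new"],
--         "docs": ["doc", "docs", "documentation"],
--         "refactor": ["refactor", "cleanup"],
--         "test": ["test", "tests"],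
--         "performance": ["performance", "speed", "optimization", "optimize"],
--         "security": ["security", "secure", "vulnerability", "auth", "encryption"],
--     }
--     # Build a search set
--     search_terms = canonical_map.get(ct, [ct])
--
--     # 1. Try to match filename
--     for t in templates:
--         fname = t["filename"].lower()
--         if any(term in fname for term in search_terms):
--             return t
--
--     # 2. Try to match first line/content
--     for t in templates:
--         content_lower = t["content"][:512].lower()
--         if any(term in content_lower for term in search_terms):
--             return t
--
--     # 3. As fallback, just return the first template if it exists
--     if templates:
--         return templates[0]
--     return {}
-- ===== SOURCE B (Python) =====
-- from typing import Dict, List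
--
-- def _find_best_template(
--     change_type: str, templates: List[Dict[str, str]]
-- ) -> Dict[str, str]:
--     """Rank each template (0 = filename match, 1 = content match, 2 = neither)
--     and return the first template with the minimal rank via min()."""
--     ct = change_type.lower()
--     terms = {
--         "bug": "bug fix bugfix",
--         "feature": "feature enhancement new",
--         "docs": "doc docs documentation",
--         "refactor": "refactor cleanup",
--         "test": "test tests",
--         "performance": "performance speed optimization optimize",
--         "security": "security secure vulnerability auth encryption",
--     }.get(ct, "").split() or [ct]
--
--     def rank(t: Dict[str, str]) -> int:
--         if any(s in t["filename"].lower() for s in terms):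
--             return 0
--         if any(s in t["content"][:512].lower() for s in terms):
--             return 1
--         return 2
--
--     return min(templates, key=rank, default={})
-- ===== Notes on version B (the rewrite author's own statement) =====
-- stated objective: idiomatic
-- what changed: Replaces A's two staged scans plus explicit fallback with a single rank function (0 filename match, 1 content match, 2 neither) and one stable min(templates, key=rank, default={}), with the term table stored as space-separated strings split on lookup.
import Mathlib
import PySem

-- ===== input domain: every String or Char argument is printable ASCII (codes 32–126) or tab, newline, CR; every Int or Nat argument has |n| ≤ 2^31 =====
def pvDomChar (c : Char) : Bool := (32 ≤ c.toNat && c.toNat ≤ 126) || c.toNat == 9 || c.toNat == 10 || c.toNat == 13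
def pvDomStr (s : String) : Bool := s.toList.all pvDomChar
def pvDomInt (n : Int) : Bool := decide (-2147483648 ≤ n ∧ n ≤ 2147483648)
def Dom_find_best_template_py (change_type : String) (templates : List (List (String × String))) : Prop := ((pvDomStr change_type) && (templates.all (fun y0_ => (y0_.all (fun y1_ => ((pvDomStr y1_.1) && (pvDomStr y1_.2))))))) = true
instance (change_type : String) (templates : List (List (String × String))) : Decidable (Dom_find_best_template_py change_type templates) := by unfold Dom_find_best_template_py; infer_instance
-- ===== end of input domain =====

-- B replaces A's two staged scans with one rank function and a stable argmin (min with key); return-value equivalence proved on templates carrying both keys.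


-- ===== PORT A =====
-- search_terms = canonical_map.get(ct, [ct]) with ct = change_type.lower()
def pvSearchTerms (change_type : String) : List String :=
  let ct := PySem.Str.lower change_type
  let canonical_map : PySem.Dict String (List String) := PySem.Dict.mk [
    ("bug", ["bug", "fix", "bugfix"]),
    ("feature", ["feature", "enhancement", "new"]),
    ("docs", ["doc", "docs", "documentation"]),
    ("refactor", ["refactor", "cleanup"]),
    ("test", ["test", "tests"]),
    ("performance", ["performance", "speed", "optimization", "optimize"]),
    ("security", ["security", "secure", "vulnerability", "auth", "encryption"])]
  PySem.Dict.getD canonical_map ct [ct]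

-- t[k]: total form of dict lookup; exact under Pre_ (key present, so KeyError impossible)
def pvKey (t : List (String × String)) (k : String) : String :=
  PySem.Dict.getD (PySem.Dict.mk t) k ""

-- any(term in t["filename"].lower() for term in search_terms)
def pvFnameMatch (terms : List String) (t : List (String × String)) : Bool :=
  terms.any (fun term => PySem.Str.isIn term (PySem.Str.lower (pvKey t "filename")))

-- any(term in t["content"][:512].lower() for term in search_terms)
def pvContentMatch (terms : List String) (t : List (String × String)) : Bool :=
  terms.any (fun term => PySem.Str.isIn term (PySem.Str.lower (PySem.Str.slice (pvKey t "content") none (some 512))))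

-- A's first loop: return the first template whose filename matches
def pvALoop1 (terms : List String) : List (List (String × String)) → Option (List (String × String))
  | [] => none
  | t :: rest => if pvFnameMatch terms t then some t else pvALoop1 terms rest

-- A's second loop: return the first template whose content[:512] matches
def pvALoop2 (terms : List String) : List (List (String × String)) → Option (List (String × String))
  | [] => none
  | t :: rest => if pvContentMatch terms t then some t else pvALoop2 terms rest

def find_best_template_py (change_type : String) (templates : List (List (String × String))) : List (String × String) :=
  let search_terms := pvSearchTerms change_type
  match pvALoop1 search_terms templates with
  | some t => t
  | none =>
    match pvALoop2 search_terms templates with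
    | some t => t
    | none =>
      match templates with
      | [] => []
      | t0 :: _ => t0

-- ===== PORT B =====
-- B's term table: space-separated strings, split on lookup; '.get(ct, "").split() or [ct]'
def pvTermsB (change_type : String) : List String :=
  let ct := PySem.Str.lower change_type
  let table : PySem.Dict String String := PySem.Dict.mk [
    ("bug", "bug fix bugfix"),
    ("feature", "feature enhancement new"),
    ("docs", "doc docs documentation"),
    ("refactor", "refactor cleanup"),
    ("test", "test tests"),
    ("performance", "performance speed optimization optimize"),
    ("security", "security secure vulnerability auth encryption")]
  let ws := PySem.Str.split₀ (PySem.Dict.getD table ct "")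
  if ws.isEmpty then [ct] else ws

-- rank(t): 0 = filename match, 1 = content match, 2 = neither
def pvRankB (terms : List String) (t : List (String × String)) : Int :=
  if terms.any (fun s => PySem.Str.isIn s (PySem.Str.lower (PySem.Dict.getD (PySem.Dict.mk t) "filename" ""))) then 0
  else if terms.any (fun s => PySem.Str.isIn s (PySem.Str.lower (PySem.Str.slice (PySem.Dict.getD (PySem.Dict.mk t) "content" "") none (some 512)))) then 1
  else 2

-- min(templates, key=rank, default={})
def find_best_template_py_alt (change_type : String) (templates : List (List (String × String))) : List (String × String) :=
  let terms := pvTermsB change_type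
  PySem.List.minD templates (pvRankB terms) []

-- ===== PRECONDITION & SPEC =====
-- Pre_ excludes templates missing a "filename" or "content" key, on which A or B raises KeyError.
-- This slightly narrows A's domain: A returns (without touching "content") when some filename
-- matches even if a preceding template lacks "content"; B's rank reads "content" of every
-- non-filename-matching template and raises there.
def Pre_find_best_template_py (change_type : String) (templates : List (List (String × String))) : Prop :=
  ∀ t ∈ templates, (t.any (fun p => p.1 == "filename")) = true ∧ (t.any (fun p => p.1 == "content")) = true
instance (change_type : String) (templates : List (List (String × String))) : Decidable (Pre_find_best_template_py change_type templates) := by unfold Pre_find_best_template_py; infer_instance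

def pvWitness_find_best_template_py : String × (List (List (String × String))) :=
  ("bug", [[("filename", "notes.md"), ("content", "fix a bug")]])

def Spec_find_best_template_py (change_type : String) (templates : List (List (String × String))) (out : List (String × String)) : Prop := out = find_best_template_py_alt change_type templates
instance (change_type : String) (templates : List (List (String × String))) (out : List (String × String)) : Decidable (Spec_find_best_template_py change_type templates out) := by unfold Spec_find_best_template_py; infer_instance

-- ===== CLAIM (what is proved, stated in full; the proofs are below) =====
def Claim_equal_find_best_template_py : Prop := ∀ (change_type : String) (templates : List (List (String × String))), Dom_find_best_template_py change_type templates → Pre_find_best_template_py change_type templates → Spec_find_best_template_py change_type templates (find_best_template_py change_type templates)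

-- ===== LEMMAS AND PROOFS =====

-- B's split-on-lookup term table yields exactly A's list-valued table
theorem pvTermsB_eq (ct : String) : pvTermsB ct = pvSearchTerms ct := by
  by_cases h1 : PySem.Str.lower ct = "bug"
  · simp only [pvTermsB, pvSearchTerms, h1]; decide
  · by_cases h2 : PySem.Str.lower ct = "feature"
    · simp only [pvTermsB, pvSearchTerms, h2]; decide
    · by_cases h3 : PySem.Str.lower ct = "docs"
      · simp only [pvTermsB, pvSearchTerms, h3]; decide
      · by_cases h4 : PySem.Str.lower ct = "refactor"
        · simp only [pvTermsB, pvSearchTerms, h4]; decide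
        · by_cases h5 : PySem.Str.lower ct = "test"
          · simp only [pvTermsB, pvSearchTerms, h5]; decide
          · by_cases h6 : PySem.Str.lower ct = "performance"
            · simp only [pvTermsB, pvSearchTerms, h6]; decide
            · by_cases h7 : PySem.Str.lower ct = "security"
              · simp only [pvTermsB, pvSearchTerms, h7]; decide
              · have e1 : ("bug" == PySem.Str.lower ct) = false := beq_eq_false_iff_ne.mpr (Ne.symm h1)
                have e2 : ("feature" == PySem.Str.lower ct) = false := beq_eq_false_iff_ne.mpr (Ne.symm h2)
                have e3 : ("docs" == PySem.Str.lower ct) = false := beq_eq_false_iff_ne.mpr (Ne.symm h3)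
                have e4 : ("refactor" == PySem.Str.lower ct) = false := beq_eq_false_iff_ne.mpr (Ne.symm h4)
                have e5 : ("test" == PySem.Str.lower ct) = false := beq_eq_false_iff_ne.mpr (Ne.symm h5)
                have e6 : ("performance" == PySem.Str.lower ct) = false := beq_eq_false_iff_ne.mpr (Ne.symm h6)
                have e7 : ("security" == PySem.Str.lower ct) = false := beq_eq_false_iff_ne.mpr (Ne.symm h7)
                have he : PySem.Str.split₀ "" = [] := by decide
                simp [pvTermsB, pvSearchTerms, PySem.Dict.getD, PySem.Dict.get?, List.find?,
                      e1, e2, e3, e4, e5, e6, e7, he]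

-- B's rank, written with A's two match predicates (definitional)
theorem pvRankB_eq (terms : List String) (t : List (String × String)) :
    pvRankB terms t = (if pvFnameMatch terms t then 0 else if pvContentMatch terms t then 1 else 2) := rfl

-- what B's min-fold returns once it carries a candidate m, phrased with A's scans of the rest
def pvPick (terms : List String) (m : List (String × String))
    (rest : List (List (String × String))) : List (String × String) :=
  if pvFnameMatch terms m then m
  else
    match pvALoop1 terms rest with
    | some t => t
    | none =>
      if pvContentMatch terms m then m
      else
        match pvALoop2 terms rest with
        | some t => t
        | none => m

-- one step of Python min's fold: the carried minimum after seeing x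
theorem pvMin?_cons_cons {α κ : Type} [LT κ] [DecidableLT κ] (key : α → κ) (m x : α) (rest : List α) :
    PySem.List.min? (m :: x :: rest) key = PySem.List.min? ((if key x < key m then x else m) :: rest) key := by
  by_cases h : key x < key m <;> simp [PySem.List.min?, List.foldl, h]

theorem pvMin?_eq_pick (terms : List String) :
    ∀ (rest : List (List (String × String))) (m : List (String × String)),
      PySem.List.min? (m :: rest) (pvRankB terms) = some (pvPick terms m rest) := by
  intro rest
  induction rest with
  | nil =>
    intro m
    simp only [PySem.List.min?, List.foldl, pvPick, pvALoop1, pvALoop2]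
    split_ifs <;> rfl
  | cons x rest ih =>
    intro m
    rw [pvMin?_cons_cons]
    by_cases hfm : pvFnameMatch terms m
    · have hstep : (if pvRankB terms x < pvRankB terms m then x else m) = m := by
        simp only [pvRankB_eq, hfm, if_true]
        split_ifs <;> simp_all
      rw [hstep, ih m]
      simp [pvPick, hfm]
    · by_cases hfx : pvFnameMatch terms x
      · have hstep : (if pvRankB terms x < pvRankB terms m then x else m) = x := by
          simp only [pvRankB_eq, hfm, hfx, if_true, Bool.false_eq_true, if_false]
          split_ifs <;> simp_all
        rw [hstep, ih x]
        simp [pvPick, pvALoop1, hfm, hfx]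
      · by_cases hcm : pvContentMatch terms m
        · have hstep : (if pvRankB terms x < pvRankB terms m then x else m) = m := by
            simp only [pvRankB_eq, hfm, hfx, Bool.false_eq_true, if_false, hcm, if_true]
            split_ifs <;> simp_all
          rw [hstep, ih m]
          cases l1 : pvALoop1 terms rest <;>
            simp [pvPick, pvALoop1, hfm, hfx, hcm, l1]
        · by_cases hcx : pvContentMatch terms x
          · have hstep : (if pvRankB terms x < pvRankB terms m then x else m) = x := by
              simp [pvRankB_eq, hfm, hfx, hcm, hcx]
            rw [hstep, ih x]
            cases l1 : pvALoop1 terms rest <;>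
              simp [pvPick, pvALoop1, pvALoop2, hfm, hfx, hcm, hcx, l1]
          · have hstep : (if pvRankB terms x < pvRankB terms m then x else m) = m := by
              simp [pvRankB_eq, hfm, hfx, hcm, hcx]
            rw [hstep, ih m]
            cases l1 : pvALoop1 terms rest <;>
              cases l2 : pvALoop2 terms rest <;>
                simp [pvPick, pvALoop1, pvALoop2, hfm, hfx, hcm, hcx, l1, l2]

-- ===== VERDICT (by name: the statement is the Claim_ definition above) =====
theorem find_best_template_py_spec : Claim_equal_find_best_template_py := by
  intro change_type templates _ _
  unfold Spec_find_best_template_py find_best_template_py find_best_template_py_alt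
  rw [pvTermsB_eq]
  cases templates with
  | nil => simp [pvALoop1, pvALoop2, PySem.List.minD, PySem.List.min?]
  | cons u rest =>
    have hmin : PySem.List.minD (u :: rest) (pvRankB (pvSearchTerms change_type)) [] =
        pvPick (pvSearchTerms change_type) u rest := by
      simp only [PySem.List.minD, pvMin?_eq_pick, Option.getD]
    rw [hmin]
    by_cases hfu : pvFnameMatch (pvSearchTerms change_type) u
    · simp [pvPick, pvALoop1, hfu]
    · by_cases hcu : pvContentMatch (pvSearchTerms change_type) u
      · cases l1 : pvALoop1 (pvSearchTerms change_type) rest <;>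
          simp [pvPick, pvALoop1, pvALoop2, hfu, hcu, l1]
      · cases l1 : pvALoop1 (pvSearchTerms change_type) rest <;>
          cases l2 : pvALoop2 (pvSearchTerms change_type) rest <;>
            simp [pvPick, pvALoop1, pvALoop2, hfu, hcu, l1, l2]
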